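-- pv_equiv track=rewrite | github.com/SayakaMiura/SCAN | Functions3.py | GetCla
-- ===== SOURCE A (Python) =====
-- def GetCla(Node,Dec2Anc):
--    Cla=[]
--    for D in Dec2Anc:
--        In=[D]
--        A=Dec2Anc[D]
--        if A==Node: Find='y'
--        else:
--           Find='n'
--           In.append(A)
--
--           while A in Dec2Anc:
--                 A=Dec2Anc[A]
--                 if A!=Node and Find=='n': In.append(A)
--                 elif A==Node: Find='y'
--
--        if Find=='y': Cla+=In
--    Cla+=[Node]
--    return Cla
-- ===== SOURCE B (Python) =====
-- def GetCla(Node, Dec2Anc):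
--     # reach[x] == True  iff the chain x, Dec2Anc[x], Dec2Anc[Dec2Anc[x]], ... hits Node
--     # (x itself counts).  Computed once with memoisation, instead of A's full
--     # re-walk (past Node, to the end of the chain) for every key.
--     reach = {Node: True}
--     for D in Dec2Anc:
--         chain = []
--         x = Dec2Anc[D]
--         while x not in reach and x in Dec2Anc:
--             chain.append(x)
--             x = Dec2Anc[x]
--         val = reach.get(x, False)
--         reach[x] = val
--         for c in chain:
--             reach[c] = val
--     Cla = []
--     for D in Dec2Anc:
--         if reach[Dec2Anc[D]]:
--             x = D
--             while x != Node:
--                 Cla.append(x)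
--                 x = Dec2Anc[x]
--     Cla.append(Node)
--     return Cla
-- ===== Notes on version B (the rewrite author's own statement) =====
-- stated objective: alternative
-- what changed: Instead of re-walking every key's whole ancestor chain (continuing past Node to the end of the chain) with A's In/Find flag bookkeeping, B first computes a memo table reach[x] ('the chain from x hits Node') by walking each chain once and caching shared suffixes, then emits paths only for qualifying keys, stopping at Node; it trades A's repeated chain walks for one memoisation pass plus the output walks.
-- outside the precondition, e.g. on GetCla('N', {'N': 'N'}): A returns ['N', 'N'], B returns ['N']; on GetCla('N', {'N': 'N', 'a': 'N'}): A returns ['N', 'a', 'N'], B returns ['a', 'N']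
import Mathlib
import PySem

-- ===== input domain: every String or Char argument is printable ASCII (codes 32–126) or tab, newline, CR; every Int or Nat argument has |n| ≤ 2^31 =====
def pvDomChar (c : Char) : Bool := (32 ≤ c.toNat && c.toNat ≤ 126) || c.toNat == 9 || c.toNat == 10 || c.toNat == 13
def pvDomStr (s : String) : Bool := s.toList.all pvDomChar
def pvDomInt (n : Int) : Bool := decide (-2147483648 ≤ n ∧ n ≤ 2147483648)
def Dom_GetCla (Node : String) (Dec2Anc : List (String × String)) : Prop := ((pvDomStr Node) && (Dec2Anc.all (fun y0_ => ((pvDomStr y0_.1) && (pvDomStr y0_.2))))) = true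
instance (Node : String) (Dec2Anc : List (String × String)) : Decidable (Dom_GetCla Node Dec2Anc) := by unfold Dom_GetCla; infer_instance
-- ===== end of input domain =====

-- B memoises, per node, whether its ancestor chain reaches Node, instead of A's full
-- re-walk of the chain (past Node, to its very end) for every key, with its In/Find flags.

-- ===== PORT A =====
-- Python A's inner 'while A in Dec2Anc' loop, with fuel (under Pre_GetCla every
-- ancestor chain escapes the key set within Dec2Anc.length steps, so the fuel
-- Dec2Anc.length + 1 is never exhausted).
def GetClaWhile (d : PySem.Dict String String) (Node : String) :
    Nat → String → List String → Bool → List String × Bool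
  | 0, _, In, Find => (In, Find)
  | n + 1, A, In, Find =>
    match d.get? A with
    | none => (In, Find)
    | some A' =>
      if A' ≠ Node ∧ Find = false then GetClaWhile d Node n A' (In ++ [A']) Find
      else if A' = Node then GetClaWhile d Node n A' In true
      else GetClaWhile d Node n A' In Find

def GetCla (Node : String) (Dec2Anc : List (String × String)) : List String :=
  (Dec2Anc.foldl (fun Cla Dp =>
      let D := Dp.1
      let A := (PySem.Dict.mk Dec2Anc).getD D ""
      if A = Node then Cla ++ [D]
      else
        let r := GetClaWhile (PySem.Dict.mk Dec2Anc) Node (Dec2Anc.length + 1) A [D, A] false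
        if r.2 = true then Cla ++ r.1 else Cla) []) ++ [Node]

-- ===== PORT B =====
-- 'while x not in reach and x in Dec2Anc: chain.append(x); x = Dec2Anc[x]' (same fuel bound as A's loop).
def BWalk (d : PySem.Dict String String) :
    Nat → String → PySem.Dict String Bool → List String → String × List String
  | 0, x, _, chain => (x, chain)
  | n + 1, x, R, chain =>
    if R.contains x = false ∧ d.contains x = true then
      BWalk d n (d.getD x "") R (chain ++ [x])
    else (x, chain)

-- B's first loop: build the memo table 'reach'.
def BPhase1 (Node : String) (Dec2Anc : List (String × String)) : PySem.Dict String Bool :=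
  Dec2Anc.foldl (fun R Dp =>
      let p := BWalk (PySem.Dict.mk Dec2Anc) (Dec2Anc.length + 1)
                 ((PySem.Dict.mk Dec2Anc).getD Dp.1 "") R []
      let val := R.getD p.1 false
      p.2.foldl (fun R' c => R'.insert c val) (R.insert p.1 val))
    (PySem.Dict.insert PySem.Dict.empty Node true)

-- 'x = D; while x != Node: Cla.append(x); x = Dec2Anc[x]'
def BPath (d : PySem.Dict String String) (Node : String) : Nat → String → List String
  | 0, _ => []
  | n + 1, x => if x = Node then [] else x :: BPath d Node n (d.getD x "")

def GetCla_alt (Node : String) (Dec2Anc : List (String × String)) : List String :=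
  let R := BPhase1 Node Dec2Anc
  (Dec2Anc.foldl (fun Cla Dp =>
      if R.getD ((PySem.Dict.mk Dec2Anc).getD Dp.1 "") false = true then
        Cla ++ BPath (PySem.Dict.mk Dec2Anc) Node (Dec2Anc.length + 1) Dp.1
      else Cla) []) ++ [Node]

-- ===== PRECONDITION & SPEC =====
def pvStep (d : PySem.Dict String String) (x : String) : String := d.getD x x

def pvIter (d : PySem.Dict String String) : Nat → String → String
  | 0, x => x
  | n + 1, x => pvIter d n (pvStep d x)

-- pvStep/pvIter are plain parent-pointer iteration on the input map (independent of both
-- ports); 'the chain from every key leaves the key set within n steps' is the standard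
-- closed-form statement that the ancestor map is acyclic.
-- Pre_GetCla excludes duplicate keys (a Python dict cannot contain them) and cyclic
-- ancestor maps, on which A's while loop diverges except in the degenerate family around
-- a Node self-loop, where A's extra copies of Node are an artefact of its loop flags.
def Pre_GetCla (Node : String) (Dec2Anc : List (String × String)) : Prop :=
  (Dec2Anc.map Prod.fst).Nodup ∧
  ∀ p ∈ Dec2Anc, ∃ i ∈ List.range (Dec2Anc.length + 1),
    (PySem.Dict.mk Dec2Anc).contains (pvIter (PySem.Dict.mk Dec2Anc) i p.1) = false

instance (Node : String) (Dec2Anc : List (String × String)) : Decidable (Pre_GetCla Node Dec2Anc) := by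
  unfold Pre_GetCla; infer_instance

def pvWitness_GetCla : String × (List (String × String)) := ("n", [("a", "n"), ("b", "a"), ("c", "z")])

def Spec_GetCla (Node : String) (Dec2Anc : List (String × String)) (out : List String) : Prop := out = GetCla_alt Node Dec2Anc
instance (Node : String) (Dec2Anc : List (String × String)) (out : List String) : Decidable (Spec_GetCla Node Dec2Anc out) := by unfold Spec_GetCla; infer_instance

-- ===== CLAIM (what is proved, stated in full; the proofs are below) =====
def Claim_equal_GetCla : Prop := ∀ (Node : String) (Dec2Anc : List (String × String)), Dom_GetCla Node Dec2Anc → Pre_GetCla Node Dec2Anc → Spec_GetCla Node Dec2Anc (GetCla Node Dec2Anc)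

-- ===== LEMMAS AND PROOFS =====

-- 'chain from x (x itself included) hits Node', with fuel.
def gR (d : PySem.Dict String String) (Node : String) : Nat → String → Bool
  | 0, _ => false
  | n + 1, x =>
    x == Node || (match d.get? x with
      | none => false
      | some a => gR d Node n a)

theorem pvStep_of_get? (d : PySem.Dict String String) (x a : String) (h : d.get? x = some a) :
    pvStep d x = a := by
  simp [pvStep, PySem.Dict.getD_eq_get?_getD, h]

theorem pvStep_of_not_contains (d : PySem.Dict String String) (x : String)
    (h : d.contains x = false) : pvStep d x = x := by
  simp [pvStep, PySem.Dict.getD_of_not_contains d x h]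

theorem stepEsc (d : PySem.Dict String String) (x : String) (n : Nat)
    (hc : d.contains x = true)
    (h : ∃ i < n + 1, d.contains (pvIter d i x) = false) :
    ∃ i < n, d.contains (pvIter d i (pvStep d x)) = false := by
  obtain ⟨i, hi, hf⟩ := h
  cases i with
  | zero =>
    simp only [pvIter] at hf
    rw [hf] at hc
    cases hc
  | succ j => exact ⟨j, by omega, by simpa only [pvIter] using hf⟩

theorem gR_congr (d : PySem.Dict String String) (Node : String) :
    ∀ n m x, (∃ i < n, d.contains (pvIter d i x) = false) → n ≤ m →
      gR d Node n x = gR d Node m x := by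
  intro n
  induction n with
  | zero => intro m x h _; obtain ⟨i, hi, _⟩ := h; omega
  | succ n ih =>
    intro m x h hm
    obtain ⟨m', rfl⟩ : ∃ m', m = m' + 1 := ⟨m - 1, by omega⟩
    cases hg : d.get? x with
    | none => simp [gR, hg]
    | some a =>
      simp only [gR, hg]
      have hc : d.contains x = true := by
        rw [PySem.Dict.contains_eq_isSome_get?, hg]; rfl
      have h' := stepEsc d x n hc h
      rw [pvStep_of_get? d x a hg] at h'
      rw [ih m' a h' (by omega)]

theorem gR_Node (d : PySem.Dict String String) (Node : String) (N : Nat) (hN : 0 < N) :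
    gR d Node N Node = true := by
  cases N with
  | zero => omega
  | succ n => simp [gR]

theorem gR_fix (d : PySem.Dict String String) (Node : String) (N : Nat)
    (hE : ∀ x, ∃ i < N, d.contains (pvIter d i x) = false) (x : String) :
    gR d Node N x = (x == Node || (match d.get? x with
      | none => false
      | some a => gR d Node N a)) := by
  rw [gR_congr d Node N (N + 1) x (hE x) (by omega)]
  rfl

theorem gR_true_iter (d : PySem.Dict String String) (Node : String) :
    ∀ n x, gR d Node n x = true → ∃ j < n, pvIter d j x = Node := by
  intro n
  induction n with
  | zero => intro x h; simp [gR] at h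
  | succ n ih =>
    intro x h
    simp only [gR, Bool.or_eq_true] at h
    cases h with
    | inl h =>
      refine ⟨0, by omega, ?_⟩
      simpa only [pvIter] using (beq_iff_eq.mp h)
    | inr h =>
      cases hg : d.get? x with
      | none => rw [hg] at h; simp at h
      | some a =>
        rw [hg] at h
        obtain ⟨j, hj, hje⟩ := ih a h
        refine ⟨j + 1, by omega, ?_⟩
        rw [show pvIter d (j + 1) x = pvIter d j (pvStep d x) from rfl,
          pvStep_of_get? d x a hg]
        exact hje

theorem pvIter_add (d : PySem.Dict String String) :
    ∀ a b x, pvIter d (a + b) x = pvIter d b (pvIter d a x) := by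
  intro a
  induction a with
  | zero => intro b x; rw [Nat.zero_add]; rfl
  | succ a ih =>
    intro b x
    rw [show a + 1 + b = (a + b) + 1 by omega]
    show pvIter d (a + b) (pvStep d x) = pvIter d b (pvIter d a (pvStep d x))
    exact ih b (pvStep d x)

theorem pvIter_stab (d : PySem.Dict String String) (x : String) (i : Nat)
    (h : d.contains (pvIter d i x) = false) :
    ∀ m, i ≤ m → pvIter d m x = pvIter d i x := by
  intro m hm
  obtain ⟨k, rfl⟩ : ∃ k, m = i + k := ⟨m - i, by omega⟩
  clear hm
  induction k with
  | zero => rfl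
  | succ k ih =>
    have h1 : pvIter d (i + (k + 1)) x = pvStep d (pvIter d (i + k) x) := by
      rw [show i + (k + 1) = (i + k) + 1 by omega, pvIter_add d (i + k) 1 x]
      rfl
    rw [h1, ih, pvStep_of_not_contains d _ h]

theorem pvIter_period (d : PySem.Dict String String) (x : String) (p : Nat)
    (h : pvIter d p x = x) : ∀ k, pvIter d (p * k) x = x := by
  intro k
  induction k with
  | zero => rfl
  | succ k ih =>
    rw [show p * (k + 1) = p * k + p by ring, pvIter_add, ih, h]

-- a key whose whole forward chain stays inside the keys contradicts the escape hypothesis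
theorem fixpoint_escape (d : PySem.Dict String String) (x : String) (N : Nat)
    (hc : d.contains x = true) (hs : pvStep d x = x)
    (hE : ∃ i < N, d.contains (pvIter d i x) = false) : False := by
  obtain ⟨i, _, hf⟩ := hE
  have hall : ∀ j, pvIter d j x = x := by
    intro j
    induction j with
    | zero => rfl
    | succ j ih =>
      rw [show pvIter d (j + 1) x = pvIter d j (pvStep d x) from rfl, hs]
      exact ih
  rw [hall i] at hf
  rw [hf] at hc
  cases hc

-- if Node is a key and its own ancestor chain reaches Node again, the map is cyclic
theorem node_no_reach (d : PySem.Dict String String) (Node : String) (N : Nat)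
    (hE : ∀ x, ∃ i < N, d.contains (pvIter d i x) = false)
    (a : String) (hget : d.get? Node = some a) (hg : gR d Node N a = true) : False := by
  have hcN : d.contains Node = true := by
    rw [PySem.Dict.contains_eq_isSome_get?, hget]; rfl
  obtain ⟨j, hj, hje⟩ := gR_true_iter d Node N a hg
  have hper : pvIter d (j + 1) Node = Node := by
    rw [show pvIter d (j + 1) Node = pvIter d j (pvStep d Node) from rfl,
      pvStep_of_get? d Node a hget]
    exact hje
  obtain ⟨i0, hi0, hf⟩ := hE Node
  have hm : pvIter d ((j + 1) * (i0 + 1)) Node = Node :=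
    pvIter_period d Node (j + 1) hper (i0 + 1)
  have hle : i0 ≤ (j + 1) * (i0 + 1) := by nlinarith
  have hst : pvIter d ((j + 1) * (i0 + 1)) Node = pvIter d i0 Node :=
    pvIter_stab d Node i0 hf _ hle
  rw [hst] at hm
  rw [hm] at hf
  rw [hf] at hcN
  cases hcN

theorem While_true (d : PySem.Dict String String) (Node : String) :
    ∀ n A In, GetClaWhile d Node n A In true = (In, true) := by
  intro n
  induction n with
  | zero => intro A In; rfl
  | succ n ih =>
    intro A In
    cases hg : d.get? A with
    | none => simp [GetClaWhile, hg]
    | some A' =>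
      simp only [GetClaWhile, hg]
      rw [if_neg (by simp)]
      split
      · exact ih A' In
      · exact ih A' In

theorem BPath_congr (d : PySem.Dict String String) (Node : String) (N : Nat)
    (hE : ∀ x, ∃ i < N, d.contains (pvIter d i x) = false) :
    ∀ n m x, (∃ i < n, d.contains (pvIter d i x) = false) → gR d Node N x = true → n ≤ m →
      BPath d Node n x = BPath d Node m x := by
  intro n
  induction n with
  | zero => intro m x h _ _; obtain ⟨i, hi, _⟩ := h; omega
  | succ n ih =>
    intro m x hesc hg hm
    obtain ⟨m', rfl⟩ : ∃ m', m = m' + 1 := ⟨m - 1, by omega⟩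
    simp only [BPath]
    by_cases hx : x = Node
    · simp [hx]
    · rw [if_neg hx, if_neg hx]
      rw [gR_fix d Node N hE x] at hg
      cases hgx : d.get? x with
      | none => rw [hgx] at hg; simp [hx] at hg
      | some a =>
        rw [hgx] at hg
        simp only [Bool.or_eq_true, beq_iff_eq, hx, false_or] at hg
        have hc : d.contains x = true := by
          rw [PySem.Dict.contains_eq_isSome_get?, hgx]; rfl
        have h' := stepEsc d x n hc hesc
        rw [pvStep_of_get? d x a hgx] at h'
        have hgd : d.getD x "" = a := by
          rw [PySem.Dict.getD_eq_get?_getD, hgx]; rfl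
        rw [hgd, ih m' a h' hg (by omega)]

theorem BPath_fix (d : PySem.Dict String String) (Node : String) (N : Nat)
    (hE : ∀ x, ∃ i < N, d.contains (pvIter d i x) = false)
    (x : String) (hg : gR d Node N x = true) :
    BPath d Node N x = if x = Node then [] else x :: BPath d Node N (d.getD x "") := by
  rw [BPath_congr d Node N hE N (N + 1) x (hE x) hg (by omega)]
  rfl

theorem BPath_node (d : PySem.Dict String String) (Node : String) (n : Nat) :
    BPath d Node (n + 1) Node = [] := by
  simp [BPath]

theorem While_snd (d : PySem.Dict String String) (Node : String) (N : Nat)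
    (hE : ∀ x, ∃ i < N, d.contains (pvIter d i x) = false) :
    ∀ n A In, A ≠ Node → (∃ i < n, d.contains (pvIter d i A) = false) →
      (GetClaWhile d Node n A In false).2 = gR d Node N A := by
  intro n
  induction n with
  | zero => intro A In _ h; obtain ⟨i, hi, _⟩ := h; omega
  | succ n ih =>
    intro A In hA hesc
    rw [gR_fix d Node N hE A]
    cases hg : d.get? A with
    | none => simp [GetClaWhile, hg, hA]
    | some A' =>
      simp only [GetClaWhile, hg]
      have hc : d.contains A = true := by
        rw [PySem.Dict.contains_eq_isSome_get?, hg]; rfl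
      have h' := stepEsc d A n hc hesc
      rw [pvStep_of_get? d A A' hg] at h'
      by_cases hA' : A' = Node
      · rw [if_neg (by simp [hA']), if_pos hA', While_true]
        have hN : 0 < N := by obtain ⟨i, hi, _⟩ := hE A; omega
        rw [hA', gR_Node d Node N hN]
        simp
      · rw [if_pos ⟨hA', trivial⟩, ih A' (In ++ [A']) hA' h']
        simp [hA]

theorem While_found (d : PySem.Dict String String) (Node : String) (N : Nat)
    (hE : ∀ x, ∃ i < N, d.contains (pvIter d i x) = false) :
    ∀ n A In, A ≠ Node → (∃ i < n, d.contains (pvIter d i A) = false) →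
      gR d Node N A = true →
      GetClaWhile d Node n A In false = (In ++ BPath d Node N (d.getD A ""), true) := by
  intro n
  induction n with
  | zero => intro A In _ h _; obtain ⟨i, hi, _⟩ := h; omega
  | succ n ih =>
    intro A In hA hesc hg
    have hfix := gR_fix d Node N hE A
    rw [hg] at hfix
    cases hgA : d.get? A with
    | none =>
      rw [hgA] at hfix
      simp [hA] at hfix
    | some A' =>
      rw [hgA] at hfix
      have hgA' : gR d Node N A' = true := by
        simpa [hA] using hfix.symm
      have hc : d.contains A = true := by
        rw [PySem.Dict.contains_eq_isSome_get?, hgA]; rfl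
      have h' := stepEsc d A n hc hesc
      rw [pvStep_of_get? d A A' hgA] at h'
      have hgd : d.getD A "" = A' := by
        rw [PySem.Dict.getD_eq_get?_getD, hgA]; rfl
      rw [hgd]
      simp only [GetClaWhile, hgA]
      by_cases hA' : A' = Node
      · rw [if_neg (by simp [hA']), if_pos hA', While_true]
        have hN : 0 < N := by obtain ⟨i, hi, _⟩ := hE A; omega
        obtain ⟨N', rfl⟩ : ∃ N', N = N' + 1 := ⟨N - 1, by omega⟩
        rw [hA', BPath_node]
        simp
      · rw [if_pos ⟨hA', trivial⟩, ih A' (In ++ [A']) hA' h' hgA']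
        rw [BPath_fix d Node N hE A' hgA', if_neg hA']
        simp

theorem BWalk_spec (d : PySem.Dict String String) (Node : String) (N : Nat)
    (hE : ∀ x, ∃ i < N, d.contains (pvIter d i x) = false)
    (R : PySem.Dict String Bool) (hNode : R.contains Node = true) :
    ∀ n x chain, (∃ i < n, d.contains (pvIter d i x) = false) →
      (∀ c ∈ chain, c ∈ (BWalk d n x R chain).2) ∧
      (x = (BWalk d n x R chain).1 ∨ x ∈ (BWalk d n x R chain).2) ∧
      (∀ c ∈ (BWalk d n x R chain).2,
        c ∈ chain ∨ gR d Node N c = gR d Node N (BWalk d n x R chain).1) ∧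
      gR d Node N x = gR d Node N (BWalk d n x R chain).1 ∧
      (R.contains (BWalk d n x R chain).1 = true ∨ d.contains (BWalk d n x R chain).1 = false) := by
  intro n
  induction n with
  | zero => intro x chain h; obtain ⟨i, hi, _⟩ := h; omega
  | succ n ih =>
    intro x chain hesc
    by_cases hc : R.contains x = false ∧ d.contains x = true
    · have hwalk : BWalk d (n + 1) x R chain = BWalk d n (d.getD x "") R (chain ++ [x]) := by
        simp only [BWalk]
        rw [if_pos hc]
      have hsome : (d.get? x).isSome := by
        rw [← PySem.Dict.contains_eq_isSome_get?]; exact hc.2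
      obtain ⟨a, ha⟩ := Option.isSome_iff_exists.mp hsome
      have hgd : d.getD x "" = a := by
        rw [PySem.Dict.getD_eq_get?_getD, ha]; rfl
      have hstep := stepEsc d x n hc.2 hesc
      rw [pvStep_of_get? d x a ha] at hstep
      rw [hwalk, hgd]
      have hxNode : x ≠ Node := by
        intro he
        rw [he, hNode] at hc
        cases hc.1
      have hgx : gR d Node N x = gR d Node N a := by
        rw [gR_fix d Node N hE x, ha]
        simp [hxNode]
      obtain ⟨p1, p2, p3, p4, p5⟩ := ih a (chain ++ [x]) hstep
      refine ⟨?_, ?_, ?_, ?_, p5⟩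
      · intro c hcm
        exact p1 c (by simp [hcm])
      · right
        exact p1 x (by simp)
      · intro c hcm
        rcases p3 c hcm with h' | h'
        · rcases List.mem_append.mp h' with h'' | h''
          · exact Or.inl h''
          · right
            rw [List.mem_singleton.mp h'']
            rw [hgx]
            exact p4
        · exact Or.inr h'
      · rw [hgx]
        exact p4
    · have hwalk : BWalk d (n + 1) x R chain = (x, chain) := by
        simp only [BWalk]
        rw [if_neg hc]
      rw [hwalk]
      refine ⟨fun c h => h, Or.inl rfl, fun c h => Or.inl h, rfl, ?_⟩
      by_cases h1 : R.contains x = true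
      · exact Or.inl h1
      · right
        have h1' : R.contains x = false := by
          cases hcx : R.contains x
          · rfl
          · exact absurd hcx h1
        cases hdx : d.contains x
        · rfl
        · exact absurd ⟨h1', hdx⟩ hc

-- memo-table invariant: every stored value is the true reachability bit
def RInv (d : PySem.Dict String String) (Node : String) (N : Nat) (R : PySem.Dict String Bool) : Prop :=
  R.contains Node = true ∧ ∀ x, R.contains x = true → R.getD x false = gR d Node N x

theorem insert_fold (d : PySem.Dict String String) (Node : String) (N : Nat) (val : Bool) :
    ∀ (ch : List String) (R : PySem.Dict String Bool), RInv d Node N R →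
      (∀ c ∈ ch, gR d Node N c = val) →
      RInv d Node N (ch.foldl (fun R' c => R'.insert c val) R) ∧
      (∀ z, R.contains z = true → (ch.foldl (fun R' c => R'.insert c val) R).contains z = true) ∧
      (∀ c ∈ ch, (ch.foldl (fun R' c => R'.insert c val) R).contains c = true) := by
  intro ch
  induction ch with
  | nil =>
    intro R hI _
    exact ⟨hI, fun z h => h, fun c hc => absurd hc (List.not_mem_nil)⟩
  | cons c cs ih =>
    intro R hI hval
    simp only [List.foldl_cons]
    have hIc : RInv d Node N (R.insert c val) := by
      constructor
      · rw [PySem.Dict.contains_insert, hI.1]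
        simp
      · intro x hx
        rw [PySem.Dict.getD_insert]
        by_cases hxc : x = c
        · rw [if_pos hxc, hxc]
          exact (hval c (List.mem_cons_self)).symm
        · rw [if_neg hxc]
          apply hI.2
          rw [PySem.Dict.contains_insert] at hx
          simpa [hxc] using hx
    obtain ⟨h1, h2, h3⟩ := ih (R.insert c val) hIc (fun c' h => hval c' (List.mem_cons_of_mem _ h))
    refine ⟨h1, ?_, ?_⟩
    · intro z hz
      exact h2 z (by rw [PySem.Dict.contains_insert, hz]; simp)
    · intro c' hc'
      rcases List.mem_cons.mp hc' with rfl | h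
      · exact h2 c' (by rw [PySem.Dict.contains_insert]; simp)
      · exact h3 c' h

theorem phase1_fold (d : PySem.Dict String String) (Node : String) (N : Nat)
    (hE : ∀ x, ∃ i < N, d.contains (pvIter d i x) = false) :
    ∀ (l : List (String × String)) (R : PySem.Dict String Bool), RInv d Node N R →
      RInv d Node N (l.foldl (fun R Dp =>
          let p := BWalk d N (d.getD Dp.1 "") R []
          let val := R.getD p.1 false
          p.2.foldl (fun R' c => R'.insert c val) (R.insert p.1 val)) R) ∧
      (∀ q ∈ l, (l.foldl (fun R Dp =>
          let p := BWalk d N (d.getD Dp.1 "") R []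
          let val := R.getD p.1 false
          p.2.foldl (fun R' c => R'.insert c val) (R.insert p.1 val)) R).contains (d.getD q.1 "") = true) ∧
      (∀ z, R.contains z = true → (l.foldl (fun R Dp =>
          let p := BWalk d N (d.getD Dp.1 "") R []
          let val := R.getD p.1 false
          p.2.foldl (fun R' c => R'.insert c val) (R.insert p.1 val)) R).contains z = true) := by
  intro l
  induction l with
  | nil =>
    intro R hI
    exact ⟨hI, fun q hq => absurd hq (List.not_mem_nil), fun z h => h⟩
  | cons q qs ih =>
    intro R hI
    simp only [List.foldl_cons]
    set p := BWalk d N (d.getD q.1 "") R [] with hpdef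
    obtain ⟨hp1, hp2, hp3, hp4, hp5⟩ :=
      BWalk_spec d Node N hE R hI.1 N (d.getD q.1 "") [] (hE (d.getD q.1 ""))
    have hval : R.getD p.1 false = gR d Node N p.1 := by
      by_cases hcy : R.contains p.1 = true
      · exact hI.2 _ hcy
      · have hcy' : R.contains p.1 = false := by
          cases h' : R.contains p.1
          · rfl
          · exact absurd h' hcy
        rw [PySem.Dict.getD_of_not_contains R false hcy']
        have hdc : d.contains p.1 = false := by
          rcases hp5 with h' | h'
          · exact absurd h' hcy
          · exact h'
        have hne : p.1 ≠ Node := by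
          intro he
          rw [he, hI.1] at hcy'
          cases hcy'
        have hnone : d.get? p.1 = none := by
          rw [← Option.not_isSome_iff_eq_none, ← PySem.Dict.contains_eq_isSome_get?, hdc]
          simp
        rw [gR_fix d Node N hE _, hnone]
        simp [hne]
    have hI1 : RInv d Node N (R.insert p.1 (R.getD p.1 false)) := by
      constructor
      · rw [PySem.Dict.contains_insert, hI.1]
        simp
      · intro x hx
        rw [PySem.Dict.getD_insert]
        by_cases hxc : x = p.1
        · rw [if_pos hxc, hxc, hval]
        · rw [if_neg hxc]
          apply hI.2
          rw [PySem.Dict.contains_insert] at hx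
          simpa [hxc] using hx
    have hchain : ∀ c ∈ p.2, gR d Node N c = R.getD p.1 false := by
      intro c hcm
      rcases hp3 c hcm with h' | h'
      · exact absurd h' (List.not_mem_nil)
      · rw [hval]
        exact h'
    obtain ⟨hIf, hmono, hcontains⟩ := insert_fold d Node N _ _ _ hI1 hchain
    obtain ⟨hfin, hq, hm2⟩ := ih _ hIf
    refine ⟨hfin, ?_, ?_⟩
    · intro q' hq'
      rcases List.mem_cons.mp hq' with rfl | hmem
      · apply hm2
        rcases hp2 with he | hm
        · rw [he]
          apply hmono
          rw [PySem.Dict.contains_insert]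
          simp [hpdef]
        · exact hcontains _ hm
      · exact hq q' hmem
    · intro z hz
      apply hm2
      apply hmono
      rw [PySem.Dict.contains_insert, hz]
      simp

-- ===== VERDICT (by name: the statement is the Claim_ definition above) =====
theorem GetCla_spec : Claim_equal_GetCla := by
  intro Node Dec2Anc _hDom hPre
  unfold Spec_GetCla
  obtain ⟨hnd, hescPre⟩ := hPre
  have hE : ∀ x, ∃ i < Dec2Anc.length + 1,
      (PySem.Dict.mk Dec2Anc).contains (pvIter (PySem.Dict.mk Dec2Anc) i x) = false := by
    intro x
    by_cases hc : (PySem.Dict.mk Dec2Anc).contains x = true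
    · have hx : x ∈ (PySem.Dict.mk Dec2Anc).keys := by
        rw [← PySem.Dict.contains_iff_mem_keys]
        exact hc
      have hx' : x ∈ Dec2Anc.map Prod.fst := hx
      obtain ⟨pp, hp, hpx⟩ := List.mem_map.mp hx'
      obtain ⟨i, hi, hf⟩ := hescPre pp hp
      refine ⟨i, List.mem_range.mp hi, ?_⟩
      rw [← hpx]
      exact hf
    · refine ⟨0, by omega, ?_⟩
      cases h' : (PySem.Dict.mk Dec2Anc).contains x
      · exact h'
      · exact absurd h' hc
  have hR0 : RInv (PySem.Dict.mk Dec2Anc) Node (Dec2Anc.length + 1)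
      (PySem.Dict.insert PySem.Dict.empty Node true) := by
    constructor
    · rw [PySem.Dict.contains_insert]
      simp
    · intro x hx
      rw [PySem.Dict.contains_insert] at hx
      have hxN : x = Node := by
        simpa using hx
      subst hxN
      rw [PySem.Dict.getD_insert]
      rw [if_pos rfl, gR_Node _ _ _ (by omega)]
  obtain ⟨hInv, hcont, _⟩ := phase1_fold (PySem.Dict.mk Dec2Anc) Node (Dec2Anc.length + 1) hE
    Dec2Anc (PySem.Dict.insert PySem.Dict.empty Node true) hR0
  have hInvB : RInv (PySem.Dict.mk Dec2Anc) Node (Dec2Anc.length + 1) (BPhase1 Node Dec2Anc) := hInv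
  have hcontB : ∀ q ∈ Dec2Anc,
      (BPhase1 Node Dec2Anc).contains ((PySem.Dict.mk Dec2Anc).getD q.1 "") = true := hcont
  simp only [GetCla, GetCla_alt]
  congr 1
  apply PySem.List.foldl_congr_mem
  intro acc Dp hDp
  have hitem : (PySem.Dict.mk Dec2Anc).get? Dp.1 = some Dp.2 :=
    PySem.Dict.get?_of_mem_items (PySem.Dict.mk Dec2Anc) (by simpa using hDp) hnd
  have hgd : (PySem.Dict.mk Dec2Anc).getD Dp.1 "" = Dp.2 := by
    rw [PySem.Dict.getD_eq_get?_getD, hitem]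
    rfl
  have hRA0 : (BPhase1 Node Dec2Anc).getD ((PySem.Dict.mk Dec2Anc).getD Dp.1 "") false
      = gR (PySem.Dict.mk Dec2Anc) Node (Dec2Anc.length + 1)
          ((PySem.Dict.mk Dec2Anc).getD Dp.1 "") :=
    hInvB.2 _ (hcontB Dp hDp)
  have hlen : 0 < Dec2Anc.length := List.length_pos_of_mem hDp
  by_cases hA0N : (PySem.Dict.mk Dec2Anc).getD Dp.1 "" = Node
  · -- direct ancestor is Node
    have hDne : Dp.1 ≠ Node := by
      intro he
      apply fixpoint_escape (PySem.Dict.mk Dec2Anc) Node (Dec2Anc.length + 1)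
      · rw [← he, PySem.Dict.contains_eq_isSome_get?, hitem]
        rfl
      · rw [← he, pvStep_of_get? _ _ _ hitem, ← hgd, hA0N, he]
      · exact hE Node
    rw [if_pos hA0N, hRA0, hA0N, if_pos (gR_Node _ _ _ (by omega))]
    obtain ⟨L, hL⟩ : ∃ L, Dec2Anc.length = L + 1 := ⟨Dec2Anc.length - 1, by omega⟩
    have hpath : BPath (PySem.Dict.mk Dec2Anc) Node (Dec2Anc.length + 1) Dp.1 = [Dp.1] := by
      simp only [BPath]
      rw [if_neg hDne, hA0N, hL, BPath_node]
    rw [hpath]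
  · rw [if_neg hA0N, hRA0]
    have hsnd := While_snd (PySem.Dict.mk Dec2Anc) Node (Dec2Anc.length + 1) hE
      (Dec2Anc.length + 1) ((PySem.Dict.mk Dec2Anc).getD Dp.1 "") [Dp.1, (PySem.Dict.mk Dec2Anc).getD Dp.1 ""]
      hA0N (hE _)
    by_cases hg : gR (PySem.Dict.mk Dec2Anc) Node (Dec2Anc.length + 1)
        ((PySem.Dict.mk Dec2Anc).getD Dp.1 "") = true
    · rw [if_pos hg]
      rw [While_found (PySem.Dict.mk Dec2Anc) Node (Dec2Anc.length + 1) hE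
        (Dec2Anc.length + 1) _ _ hA0N (hE _) hg]
      simp only []
      have hDne : Dp.1 ≠ Node := by
        intro he
        apply node_no_reach (PySem.Dict.mk Dec2Anc) Node (Dec2Anc.length + 1) hE Dp.2
        · rw [← he]
          exact hitem
        · rw [← hgd]
          exact hg
      have hgD : gR (PySem.Dict.mk Dec2Anc) Node (Dec2Anc.length + 1) Dp.1 = true := by
        rw [gR_fix _ _ _ hE, hitem]
        simp only [Bool.or_eq_true, beq_iff_eq]
        right
        rw [← hgd]
        exact hg
      rw [BPath_fix _ _ _ hE Dp.1 hgD, if_neg hDne,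
          BPath_fix _ _ _ hE _ hg, if_neg hA0N]
      simp
    · rw [if_neg hg]
      have hfalse : (GetClaWhile (PySem.Dict.mk Dec2Anc) Node (Dec2Anc.length + 1)
          ((PySem.Dict.mk Dec2Anc).getD Dp.1 "")
          [Dp.1, (PySem.Dict.mk Dec2Anc).getD Dp.1 ""] false).2 ≠ true := by
        rw [hsnd]
        exact hg
      rw [if_neg hfalse]
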